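-- pv_equiv track=rewrite | github.com/pypi-data/pypi-mirror-4 | packages/kahgean/kahgean-0.1.4.tar.gz/kahgean-0.1.4/kahgean/ipv4addr.py | _init_from_seq
-- ===== SOURCE A (Python) =====
-- def _init_from_seq(seq):
--     if len(seq)!=4:
--         raise ValueError('length of seq should be 4')
--     v = [int(i) for i in seq]
--     for i in v:
--         if i<0 or i>2**8-1:
--             raise ValueError('each piece in a IPv4 address should be in '
--                              '[0, 255]')
--     return v[0]*2**24 + v[1]*2**16 + v[2]*2**8 + v[3]
-- ===== SOURCE B (Python) =====
-- def _init_from_seq(seq):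
--     # Same guards as A, but combine bytes with a Horner fold instead of an unrolled weighted sum.
--     if len(seq) != 4:
--         raise ValueError('length of seq should be 4')
--     v = [int(i) for i in seq]
--     for i in v:
--         if i < 0 or i > 2**8 - 1:
--             raise ValueError('each piece in a IPv4 address should be in '
--                              '[0, 255]')
--     acc = 0
--     for x in v:
--         acc = acc * 256 + x
--     return acc
-- ===== Notes on version B (the rewrite author's own statement) =====
-- stated objective: alternative
-- what changed: The unrolled four-term weighted sum of the four pieces is replaced by a Horner accumulation loop acc=acc*256+x over the validated list; guards and validation order are unchanged.
import Mathlib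
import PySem

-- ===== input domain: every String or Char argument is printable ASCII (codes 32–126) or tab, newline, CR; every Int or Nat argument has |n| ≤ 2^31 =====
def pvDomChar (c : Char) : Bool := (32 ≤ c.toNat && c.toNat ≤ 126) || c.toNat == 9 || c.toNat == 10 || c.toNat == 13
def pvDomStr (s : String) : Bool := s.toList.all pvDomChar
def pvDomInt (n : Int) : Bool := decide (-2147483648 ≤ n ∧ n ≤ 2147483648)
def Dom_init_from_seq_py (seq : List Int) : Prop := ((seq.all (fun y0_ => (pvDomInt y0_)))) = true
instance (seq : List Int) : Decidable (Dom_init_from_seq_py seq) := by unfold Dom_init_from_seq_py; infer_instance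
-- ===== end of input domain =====

-- B replaces A's unrolled weighted sum with a Horner fold over the validated list (objective: alternative).


-- ===== PORT A =====
-- Literal transliteration of A; where the Python raises (length ≠ 4, element out of range 0..255,
-- both excluded by Pre_) the port returns 0. int(i) on an int is the identity.
def init_from_seq_py (seq : List Int) : Int :=
  if seq.length ≠ 4 then 0
  else
    let v := seq.map (fun i => i)
    if v.any (fun i => i < 0 || i > 2 ^ 8 - 1) then 0
    else ((PySem.List.pyGet? v 0).getD 0) * 2 ^ 24 + ((PySem.List.pyGet? v 1).getD 0) * 2 ^ 16
         + ((PySem.List.pyGet? v 2).getD 0) * 2 ^ 8 + ((PySem.List.pyGet? v 3).getD 0)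

-- ===== PORT B =====
def init_from_seq_py_alt (seq : List Int) : Int :=
  if seq.length ≠ 4 then 0
  else
    let v := seq.map (fun i => i)
    if v.any (fun i => i < 0 || i > 2 ^ 8 - 1) then 0
    else v.foldl (fun acc x => acc * 256 + x) 0

-- ===== PRECONDITION & SPEC =====
-- Pre_: exactly the inputs where the Python A returns (length 4, every piece between 0 and 255).
def Pre_init_from_seq_py (seq : List Int) : Prop :=
  seq.length = 4 ∧ ∀ i ∈ seq, 0 ≤ i ∧ i ≤ 255
instance (seq : List Int) : Decidable (Pre_init_from_seq_py seq) := by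
  unfold Pre_init_from_seq_py; infer_instance
def pvWitness_init_from_seq_py : List Int := [192, 168, 0, 1]

def Spec_init_from_seq_py (seq : List Int) (out : Int) : Prop := out = init_from_seq_py_alt seq
instance (seq : List Int) (out : Int) : Decidable (Spec_init_from_seq_py seq out) := by
  unfold Spec_init_from_seq_py; infer_instance

-- ===== CLAIM (what is proved, stated in full; the proofs are below) =====
def Claim_equal_init_from_seq_py : Prop :=
  ∀ (seq : List Int), Dom_init_from_seq_py seq → Pre_init_from_seq_py seq →
    Spec_init_from_seq_py seq (init_from_seq_py seq)

-- ===== LEMMAS AND PROOFS =====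

-- ===== VERDICT (by name: the statement is the Claim_ definition above) =====
theorem init_from_seq_py_spec : Claim_equal_init_from_seq_py := by
  intro seq _ hpre
  obtain ⟨hlen, _⟩ := hpre
  match seq, hlen with
  | [a, b, c, d], _ =>
    show init_from_seq_py [a, b, c, d] = init_from_seq_py_alt [a, b, c, d]
    simp only [init_from_seq_py, init_from_seq_py_alt, List.map, List.foldl,
      PySem.List.pyGet?, PySem.List.pyIdx?]
    split
    · rfl
    · split
      · rfl
      · norm_num [show (2:Int).toNat = 2 from rfl, show (3:Int).toNat = 3 from rfl]; ring
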